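-- pv_equiv track=rewrite | github.com/dezmui/dbsystemsproject | player_edit_video_update.py | check_price
-- ===== SOURCE A (Python) =====
-- def check_price(price):
--     legal = "0123456789."
--     countdot = 0
--     for i in price:
--         if i ==".":
--             countdot+=1
--             if countdot > 1:
--                 return True
--         if i not in legal:
--             return True
--     return False
-- ===== SOURCE B (Python) =====
-- def check_price(price):
--     # Invalid iff a second dot exists (substring search from past the first dot)
--     # or the character set of the string is not a subset of the legal set.
--     second_dot = price.find(".", price.find(".") + 1)
--     return second_dot != -1 or not set(price) <= set("0123456789.")
-- ===== Notes on version B (the rewrite author's own statement) =====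
-- stated objective: alternative
-- what changed: Replaces A's per-character counting loop with two loop-free primitives: a substring search for a second dot (find with a start offset past the first dot) or-ed with a set-subset test of the string's character set against the legal set.
import Mathlib
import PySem

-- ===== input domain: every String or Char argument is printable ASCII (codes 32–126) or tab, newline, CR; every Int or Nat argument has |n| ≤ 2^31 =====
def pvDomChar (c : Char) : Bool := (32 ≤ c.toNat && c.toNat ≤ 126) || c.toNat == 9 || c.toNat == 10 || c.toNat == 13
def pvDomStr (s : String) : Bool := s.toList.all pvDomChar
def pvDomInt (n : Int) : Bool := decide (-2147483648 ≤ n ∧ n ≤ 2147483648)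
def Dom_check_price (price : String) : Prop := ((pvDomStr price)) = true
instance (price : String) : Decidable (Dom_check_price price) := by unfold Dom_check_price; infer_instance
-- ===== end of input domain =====

-- B replaces A's counting loop by a substring search for a second dot plus a set-subset test.

-- ===== PORT A =====
def legalChars : List Char := "0123456789.".toList

-- A's for-loop over price with the countdot accumulator and early returns
def checkLoopA : List Char → Nat → Bool
  | [], _ => false
  | i :: rest, countdot =>
    if i = '.' then
      if countdot + 1 > 1 then true
      else if legalChars.contains i then checkLoopA rest (countdot + 1) else true
    else if legalChars.contains i then checkLoopA rest countdot else true

def check_price (price : String) : Bool := checkLoopA price.toList 0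

-- ===== PORT B =====
def check_price_alt (price : String) : Bool :=
  let secondDot := PySem.Str.findFrom price "." (PySem.Str.find price "." + 1) none
  decide (secondDot ≠ -1)
    || !(PySem.Set.issubset (PySem.Set.ofList price.toList)
          (PySem.Set.ofList "0123456789.".toList))

-- ===== PRECONDITION & SPEC =====
def Spec_check_price (price : String) (out : Bool) : Prop := out = check_price_alt price
instance (price : String) (out : Bool) : Decidable (Spec_check_price price out) := by unfold Spec_check_price; infer_instance

-- ===== CLAIM (what is proved, stated in full; the proofs are below) =====
def Claim_equal_check_price : Prop := ∀ (price : String), Dom_check_price price → Spec_check_price price (check_price price)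

-- ===== LEMMAS AND PROOFS =====

theorem checkLoopA_eq (cs : List Char) : ∀ d : Nat, d ≤ 1 →
    checkLoopA cs d
      = (decide (d + cs.countP (fun c => c == '.') > 1)
          || cs.any (fun c => !(legalChars.contains c))) := by
  induction cs with
  | nil => intro d hd; simp [checkLoopA]; omega
  | cons i rest ih =>
    intro d hd
    by_cases hdot : i = '.'
    · subst hdot
      by_cases h1 : d + 1 > 1
      · simp [checkLoopA, h1, legalChars]
        omega
      · have hd0 : d = 0 := by omega
        subst hd0
        simp [checkLoopA, List.any_cons, legalChars, ih 1 (by omega)]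
    · by_cases hleg : legalChars.contains i
      · simp only [List.contains_eq_mem] at hleg
        simp [checkLoopA, hdot, hleg, List.any_cons, ih d hd]
      · simp only [List.contains_eq_mem] at hleg
        simp [checkLoopA, hdot, hleg]

theorem singleton_prefix_iff (a : Char) (l : List Char) :
    [a] <+: l ↔ l.head? = some a := by
  cases l with
  | nil => simp
  | cons x xs =>
    constructor
    · rintro ⟨t, ht⟩
      simp at ht
      simp [ht.1]
    · intro h
      simp at h
      exact ⟨xs, by simp [h]⟩

theorem singleton_infix_iff (a : Char) (l : List Char) :
    [a] <:+: l ↔ a ∈ l := by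
  constructor
  · rintro ⟨s, t, h⟩
    subst h; simp
  · intro h
    obtain ⟨s, t, h⟩ := List.append_of_mem h
    exact ⟨s, t, by simp [h]⟩


-- the second-dot search succeeds iff the string has more than one dot
theorem findFrom_second_dot (cs : List Char) :
    (PySem.Chars.findFrom cs ['.'] (PySem.Chars.find cs ['.'] + 1) none ≠ -1)
      ↔ 1 < cs.countP (fun c => c == '.') := by
  rcases Int.lt_or_le (PySem.Chars.find cs ['.']) 0 with hneg | hpos
  · -- no dot at all
    have hm1 : PySem.Chars.find cs ['.'] = -1 := by
      have := PySem.Chars.neg_one_le_find cs ['.']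
      omega
    have hnin : '.' ∉ cs := by
      intro hmem
      have := (PySem.Chars.find_eq_neg_one_iff cs ['.']).mp hm1
      exact this ((singleton_infix_iff _ _).mpr hmem)
    have hc0 : cs.countP (fun c => c == '.') = 0 := by
      rw [List.countP_eq_zero]
      intro a ha
      simp only [beq_iff_eq]
      intro h; exact hnin (h ▸ ha)
    rw [hm1]
    simp [PySem.Chars.findFrom_zero, hc0, hm1]
  · -- first dot found at index j
    set j : Nat := (PySem.Chars.find cs ['.']).toNat with hj
    have hcast : PySem.Chars.find cs ['.'] = (j : Int) := by omega
    obtain ⟨hpre, hfirst⟩ := PySem.Chars.find_spec hpos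
    rw [hcast] at hpre hfirst
    simp only [Int.toNat_natCast] at hpre hfirst
    have hjget : cs[j]? = some '.' := by
      have := (singleton_prefix_iff '.' (cs.drop j)).mp hpre
      rwa [List.head?_drop] at this
    have hjlt : j < cs.length := by
      by_contra h
      rw [List.getElem?_eq_none (by omega)] at hjget
      simp at hjget
    have hk : j + 1 ≤ cs.length := by omega
    have hstep : PySem.Chars.find cs ['.'] + 1 = ((j + 1 : Nat) : Int) := by omega
    have hiff := PySem.Chars.findFrom_natCast_eq_neg_one_iff cs ['.'] (j + 1) hk
    have htake0 : (cs.take j).countP (fun c => c == '.') = 0 := by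
      rw [List.countP_eq_zero]
      intro a ha
      obtain ⟨i, hi, hgi⟩ := List.getElem_of_mem ha
      have hij : i < j := by
        have := List.length_take_le j cs
        omega
      have hne := hfirst i hij
      rw [singleton_prefix_iff, List.head?_drop] at hne
      rw [List.getElem_take] at hgi
      have : cs[i]? = some a := by
        rw [List.getElem?_eq_getElem (by omega)]
        simp [hgi]
      simp only [beq_iff_eq]
      intro heq
      exact hne (by rw [this, heq])
    have hsplit : cs.countP (fun c => c == '.')
        = 1 + (cs.drop (j + 1)).countP (fun c => c == '.') := by
      conv_lhs => rw [← List.take_append_drop (j + 1) cs]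
      rw [List.countP_append, List.take_add_one, List.countP_append, htake0, hjget]
      simp
    rw [hstep, hsplit]
    constructor
    · intro h
      have hinfix : '.' ∈ cs.drop (j + 1) := by
        by_contra hm
        exact h (hiff.mpr (fun hin => hm ((singleton_infix_iff _ _).mp hin)))
      have : 0 < (cs.drop (j + 1)).countP (fun c => c == '.') :=
        List.countP_pos_iff.mpr ⟨'.', hinfix, by simp⟩
      omega
    · intro h
      have : 0 < (cs.drop (j + 1)).countP (fun c => c == '.') := by omega
      obtain ⟨a, hmem, hpa⟩ := List.countP_pos_iff.mp this
      have ha : a = '.' := by simpa using hpa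
      subst ha
      intro heq
      exact (hiff.mp heq) ((singleton_infix_iff _ _).mpr hmem)

theorem check_price_spec : Claim_equal_check_price := by
  intro price _
  unfold Spec_check_price check_price check_price_alt
  rw [checkLoopA_eq price.toList 0 (by omega)]
  simp only [PySem.Str.findFrom_eq, PySem.Str.find_eq]
  have h1 : (decide (0 + price.toList.countP (fun c => c == '.') > 1))
      = decide (PySem.Chars.findFrom price.toList ".".toList
          (PySem.Chars.find price.toList ".".toList + 1) none ≠ -1) := by
    apply decide_eq_decide.mpr
    have := findFrom_second_dot price.toList
    constructor
    · intro h; exact this.mpr (by omega)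
    · intro h; have := this.mp h; omega
  have h2 : price.toList.any (fun c => !(legalChars.contains c))
      = !(PySem.Set.issubset (PySem.Set.ofList price.toList)
            (PySem.Set.ofList "0123456789.".toList)) := by
    rw [Bool.eq_iff_iff, Bool.not_eq_true', List.any_eq_true, Bool.eq_false_iff]
    constructor
    · rintro ⟨c, hc, hcl⟩ hs
      have hm := (PySem.Set.issubset_iff _ _).mp hs c
        ((PySem.Set.mem_ofList _ _).mpr hc)
      rw [PySem.Set.mem_ofList] at hm
      simp only [Bool.not_eq_true', List.contains_eq_mem,
        decide_eq_false_iff_not] at hcl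
      exact hcl hm
    · intro hs
      by_contra hall
      push Not at hall
      apply hs
      rw [PySem.Set.issubset_iff]
      intro x hx
      rw [PySem.Set.mem_ofList] at hx ⊢
      have h := hall x hx
      have hcx : legalChars.contains x = true := by
        cases hcv : legalChars.contains x with
        | true => rfl
        | false => exact absurd (by rw [hcv]; rfl) h
      rw [List.contains_eq_mem, decide_eq_true_eq] at hcx
      exact hcx
  rw [h1, h2]
  rfl
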